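-- pv_equiv track=rewrite | github.com/joshanashakya/dissertation | workspace/dataset/java-python/GeeksForGeeks/632/A/2.py | distinctSubstring
-- ===== SOURCE A (Python) =====
-- def distinctSubstring(P, Q, K, N):
--
--     # Hashmap to store all substrings
--     S = set()
--
--     # Iterate over all substrings
--     for i in range(0,N):
--
--         # Maintain the sum of all characters
--         # encountered so far
--         sum = 0;
--
--         # Maintain the substring till the
--         # current position
--         s = ''
--
--         for j in range(i,N):
--
--             # Get the position of the
--             # character in string Q
--             pos = ord(P[j]) - 97
--
--             # Add weight to current sum
--             sum = sum + ord(Q[pos]) - 48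
--
--             # Add current character to substring
--             s += P[j]
--
--             # If sum of characters is <=K
--             # then insert in into the set
--             if (sum <= K):
--                 S.add(s)
--             else:
--                 break
--
--     # Finding the size of the set
--     return len(S)
-- ===== SOURCE B (Python) =====
-- def distinctSubstring(P, Q, K, N):
--     # Prefix sums of the character weights, then per start a boundary scan
--     # over the sums and slice extraction; distinct substrings kept in a set.
--     n = max(N, 0)
--     pre = [0]
--     for c in P[:n]:
--         pre.append(pre[-1] + ord(Q[ord(c) - 97]) - 48)
--     seen = set()
--     for i in range(n):
--         j = i
--         while j < n and pre[j + 1] - pre[i] <= K: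
--             j += 1
--         for t in range(i + 1, j + 1):
--             seen.add(P[i:t])
--     return len(seen)
-- ===== Notes on version B (the rewrite author's own statement) =====
-- stated objective: alternative
-- what changed: B precomputes the character weights and a prefix-sum array once, finds each start's valid-end boundary by a scan over the sums, and collects the valid substrings as slices, instead of A's single fused loop carrying a running sum and an incrementally concatenated string with a break.
import Mathlib
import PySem

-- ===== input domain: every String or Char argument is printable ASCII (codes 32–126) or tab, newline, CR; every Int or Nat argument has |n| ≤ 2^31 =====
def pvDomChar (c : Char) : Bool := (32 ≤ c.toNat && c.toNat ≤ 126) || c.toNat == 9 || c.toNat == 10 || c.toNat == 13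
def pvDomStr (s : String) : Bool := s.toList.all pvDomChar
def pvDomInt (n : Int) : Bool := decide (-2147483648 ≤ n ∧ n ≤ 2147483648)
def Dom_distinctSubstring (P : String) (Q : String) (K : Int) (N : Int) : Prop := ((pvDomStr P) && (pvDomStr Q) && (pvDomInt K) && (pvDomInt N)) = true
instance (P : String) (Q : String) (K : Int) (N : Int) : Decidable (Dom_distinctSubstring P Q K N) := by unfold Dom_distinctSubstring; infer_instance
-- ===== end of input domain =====

-- B replaces A's fused O(N^2)-insertions loop (running sum + incremental string concatenation +
-- break) by a precomputed prefix-sum array, a per-start boundary scan over the sums, and slice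
-- extraction of the valid substrings; objective: alternative decomposition, same set semantics.

-- ===== PORT A =====
-- inner 'for j in range(i, N)' loop of A, with its early 'break'
def pvWA_inner (L Q : List Char) (K : Int) : List Int → Int → List Char → PySem.Set (List Char) → PySem.Set (List Char)
  | [], _, _, S => S
  | j :: js, sum, s, S =>
    let c := (PySem.List.pyGet? L j).getD ' '
    let pos : Int := (c.toNat : Int) - 97
    let d := (PySem.List.pyGet? Q pos).getD ' '
    let sum' := sum + ((d.toNat : Int) - 48)
    let s' := s ++ [c]
    if sum' ≤ K then pvWA_inner L Q K js sum' s' (PySem.Set.add S s') else S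

def distinctSubstring (P : String) (Q : String) (K : Int) (N : Int) : Int :=
  let L := P.toList
  let QL := Q.toList
  let S := (PySem.List.pyRange 0 N 1).foldl
    (fun S i => pvWA_inner L QL K (PySem.List.pyRange i N 1) 0 [] S) PySem.Set.empty
  PySem.Set.len S

-- ===== PORT B =====
-- weight of one character: ord(Q[ord(c) - 97]) - 48
def pvWB_w (Q : List Char) (c : Char) : Int :=
  (((PySem.List.pyGet? Q ((c.toNat : Int) - 97)).getD ' ').toNat : Int) - 48

-- pre = [0]; for c in P[:n]: pre.append(pre[-1] + weight(c))
def pvWB_pre (Q : List Char) (cs : List Char) : List Int :=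
  cs.foldl (fun acc c => acc ++ [PySem.List.pyGetD acc (-1) 0 + pvWB_w Q c]) [0]

-- while j < n and pre[j + 1] - pre[i] <= K: j += 1
def pvWB_find (pre : List Int) (K n i : Int) (j : Int) : Int :=
  if h : j < n ∧ PySem.List.pyGetD pre (j + 1) 0 - PySem.List.pyGetD pre i 0 ≤ K then
    pvWB_find pre K n i (j + 1)
  else j
termination_by (n - j).toNat
decreasing_by omega

def distinctSubstring_alt (P : String) (Q : String) (K : Int) (N : Int) : Int :=
  let n : Int := max N 0
  let L := P.toList
  let pre := pvWB_pre Q.toList (PySem.List.slice L none (some n))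
  let S := (PySem.List.pyRange 0 n 1).foldl
    (fun S i =>
      let j := pvWB_find pre K n i i
      (PySem.List.pyRange (i + 1) (j + 1) 1).foldl
        (fun S t => PySem.Set.add S (PySem.List.slice L (some i) (some t))) S)
    PySem.Set.empty
  PySem.Set.len S

-- ===== PRECONDITION & SPEC =====
-- Exactly the inputs on which the Python A returns (no IndexError): N within P's length and every
-- weight index ord(c)-97 of the first N characters a valid (possibly negative) Python index into Q.
def Pre_distinctSubstring (P : String) (Q : String) (K : Int) (N : Int) : Prop :=
  N ≤ (P.toList.length : Int) ∧
  (P.toList.take N.toNat).all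
    (fun c => decide (PySem.Raise.InRange Q.toList.length ((c.toNat : Int) - 97))) = true
instance (P : String) (Q : String) (K : Int) (N : Int) : Decidable (Pre_distinctSubstring P Q K N) := by
  unfold Pre_distinctSubstring; infer_instance

def pvWitness_distinctSubstring : String × String × Int × Int := ("abab", "0957", 20, 4)

def Spec_distinctSubstring (P : String) (Q : String) (K : Int) (N : Int) (out : Int) : Prop := out = distinctSubstring_alt P Q K N
instance (P : String) (Q : String) (K : Int) (N : Int) (out : Int) : Decidable (Spec_distinctSubstring P Q K N out) := by unfold Spec_distinctSubstring; infer_instance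

-- ===== CLAIM (what is proved, stated in full; the proofs are below) =====
def Claim_equal_distinctSubstring : Prop := ∀ (P : String) (Q : String) (K : Int) (N : Int), Dom_distinctSubstring P Q K N → Pre_distinctSubstring P Q K N → Spec_distinctSubstring P Q K N (distinctSubstring P Q K N)

-- ===== LEMMAS AND PROOFS =====

-- partial sums of the weights, as B's pre list builds them
def pvPS (Q : List Char) (a : Int) : List Char → List Int
  | [] => []
  | c :: cs => (a + pvWB_w Q c) :: pvPS Q (a + pvWB_w Q c) cs

theorem pvPS_foldl (Q : List Char) (cs : List Char) (acc : List Int) (a : Int)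
    (h : PySem.List.pyGetD acc (-1) 0 = a) :
    cs.foldl (fun acc c => acc ++ [PySem.List.pyGetD acc (-1) 0 + pvWB_w Q c]) acc
      = acc ++ pvPS Q a cs := by
  induction cs generalizing acc a with
  | nil => simp [pvPS]
  | cons c cs ih =>
    simp only [List.foldl_cons, pvPS, h]
    rw [ih _ (a + pvWB_w Q c) (PySem.List.pyGetD_neg_one_append_singleton _ _ _)]
    simp

theorem pvWB_pre_eq (Q cs : List Char) : pvWB_pre Q cs = 0 :: pvPS Q 0 cs := by
  unfold pvWB_pre
  rw [pvPS_foldl Q cs [0] 0 (by decide)]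
  simp

theorem pvPS_getD (Q : List Char) (cs : List Char) (a : Int) (k : Nat) (hk : k < cs.length) :
    (pvPS Q a cs).getD k 0 = a + ((cs.take (k + 1)).map (pvWB_w Q)).sum := by
  induction cs generalizing a k with
  | nil => simp at hk
  | cons c cs ih =>
    cases k with
    | zero => simp [pvPS]
    | succ k =>
      simp only [pvPS, List.getD_cons_succ, List.take_succ_cons, List.map_cons, List.sum_cons]
      rw [ih _ k (by simpa using hk)]
      ring

-- pre[k] for 0 ≤ k ≤ |cs| is the sum of the first k weights
theorem pvPre_getD (Q cs : List Char) (k : Nat) (hk : k ≤ cs.length) :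
    PySem.List.pyGetD (pvWB_pre Q cs) (k : Int) 0 = ((cs.take k).map (pvWB_w Q)).sum := by
  rw [pvWB_pre_eq]
  rw [PySem.List.pyGetD_natCast]
  cases k with
  | zero => simp
  | succ k =>
    simp only [List.getD_cons_succ]
    rw [pvPS_getD Q cs 0 k (by omega)]
    simp

theorem pvWB_find_ge (pre : List Int) (K n i j : Int) : j ≤ pvWB_find pre K n i j := by
  unfold pvWB_find
  split
  · have := pvWB_find_ge pre K n i (j + 1); omega
  · omega
termination_by (n - j).toNat
decreasing_by omega

-- appending the next character extends a substring slice by one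
theorem pvSlice_snoc (L : List Char) (a b : Nat) (hab : a ≤ b) (hb : b < L.length) :
    (L.drop a).take (b - a) ++ [L[b]] = (L.drop a).take (b + 1 - a) := by
  have h1 : b + 1 - a = (b - a) + 1 := by omega
  rw [h1, List.take_add_one]
  have h2 : (L.drop a)[b - a]? = some L[b] := by
    rw [List.getElem?_drop]
    have : a + (b - a) = b := by omega
    rw [this, List.getElem?_eq_getElem hb]
  simp [h2]

theorem pvSum_succ (Q L : List Char) (j : Nat) (hj : j < L.length) :
    ((L.take (j + 1)).map (pvWB_w Q)).sum = ((L.take j).map (pvWB_w Q)).sum + pvWB_w Q L[j] := by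
  rw [List.map_take, List.map_take, List.sum_take_succ _ j (by simpa using hj)]
  simp

-- the heart of the proof: A's inner loop from position j0 inserts exactly the slices
-- P[i:t] for t in (j0, find(j0)]
theorem pvInner_eq (L Q : List Char) (K N : Int)
    (hlen : N ≤ (L.length : Int)) (i : Int) (hi : 0 ≤ i) :
    ∀ (j0 : Int), i ≤ j0 → j0 ≤ N → ∀ (S : PySem.Set (List Char)),
    pvWA_inner L Q K (PySem.List.pyRange j0 N 1)
      (PySem.List.pyGetD (pvWB_pre Q (L.take N.toNat)) j0 0
        - PySem.List.pyGetD (pvWB_pre Q (L.take N.toNat)) i 0)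
      (PySem.List.slice L (some i) (some j0)) S
    = (PySem.List.pyRange (j0 + 1) (pvWB_find (pvWB_pre Q (L.take N.toNat)) K N i j0 + 1) 1).foldl
        (fun S t => PySem.Set.add S (PySem.List.slice L (some i) (some t))) S := by
  intro j0
  generalize hd : (N - j0).toNat = d
  induction d generalizing j0 with
  | zero =>
    intro hij hjN S
    have hj0 : j0 = N := by omega
    rw [hj0, PySem.List.pyRange_one_eq_nil le_rfl, pvWB_find,
      dif_neg (by rintro ⟨h, -⟩; omega), PySem.List.pyRange_one_eq_nil (by omega)]
    rfl
  | succ d ih =>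
    intro hij hjN S
    have hjN' : j0 < N := by omega
    set pre := pvWB_pre Q (L.take N.toNat) with hpre
    have hjl : j0.toNat < L.length := by omega
    have hc : PySem.List.pyGet? L j0 = some L[j0.toNat] := by
      rw [PySem.List.pyGet?_of_nonneg L (by omega), List.getElem?_eq_getElem hjl]
    -- pre values are partial weight sums
    have hpre_at : ∀ (k : Int), 0 ≤ k → k ≤ N →
        PySem.List.pyGetD pre k 0 = ((L.take k.toNat).map (pvWB_w Q)).sum := by
      intro k hk0 hkN
      have hk : k = ((k.toNat : Nat) : Int) := by omega
      rw [hk, hpre, pvPre_getD Q _ k.toNat (by simp; omega)]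
      rw [List.take_take, show min k.toNat N.toNat = k.toNat by omega,
        show ((k.toNat : Int)).toNat = k.toNat by omega]
    have hsum : PySem.List.pyGetD pre j0 0 - PySem.List.pyGetD pre i 0 + pvWB_w Q L[j0.toNat]
        = PySem.List.pyGetD pre (j0 + 1) 0 - PySem.List.pyGetD pre i 0 := by
      rw [hpre_at j0 (by omega) (by omega), hpre_at (j0 + 1) (by omega) (by omega)]
      have h1 : (j0 + 1).toNat = j0.toNat + 1 := by omega
      rw [h1, pvSum_succ Q L j0.toNat hjl]
      ring
    have hslice : PySem.List.slice L (some i) (some j0) ++ [L[j0.toNat]]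
        = PySem.List.slice L (some i) (some (j0 + 1)) := by
      rw [PySem.List.slice_toNat L (by omega) (by omega : (0:Int) ≤ j0),
          PySem.List.slice_toNat L (by omega) (by omega : (0:Int) ≤ j0 + 1)]
      have h1 : (j0 + 1).toNat = j0.toNat + 1 := by omega
      rw [h1]
      exact pvSlice_snoc L i.toNat j0.toNat (by omega) hjl
    rw [PySem.List.pyRange_one_cons hjN']
    simp only [pvWA_inner, hc, Option.getD_some]
    have hw : (((PySem.List.pyGet? Q (((L[j0.toNat].toNat : Nat) : Int) - 97)).getD ' ').toNat : Int) - 48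
        = pvWB_w Q L[j0.toNat] := rfl
    rw [hw, hsum, hslice]
    by_cases hK : PySem.List.pyGetD pre (j0 + 1) 0 - PySem.List.pyGetD pre i 0 ≤ K
    · rw [if_pos hK]
      have hfind : pvWB_find pre K N i j0 = pvWB_find pre K N i (j0 + 1) := by
        rw [pvWB_find, dif_pos ⟨hjN', hK⟩]
      have hge : j0 + 1 ≤ pvWB_find pre K N i (j0 + 1) := pvWB_find_ge pre K N i (j0 + 1)
      rw [hfind,
        show PySem.List.pyRange (j0 + 1) (pvWB_find pre K N i (j0 + 1) + 1) 1
            = (j0 + 1) :: PySem.List.pyRange (j0 + 1 + 1) (pvWB_find pre K N i (j0 + 1) + 1) 1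
          from PySem.List.pyRange_one_cons (by omega),
        List.foldl_cons]
      exact ih (j0 + 1) (by omega) (by omega) (by omega) _
    · rw [if_neg hK]
      have hfind : pvWB_find pre K N i j0 = j0 := by
        rw [pvWB_find, dif_neg (by tauto)]
      rw [hfind, PySem.List.pyRange_one_eq_nil (by omega)]
      rfl

-- ===== VERDICT (by name: the statement is the Claim_ definition above) =====
theorem distinctSubstring_spec : Claim_equal_distinctSubstring := by
  intro P Q K N _hdom hpre
  obtain ⟨hlen, -⟩ := hpre
  simp only [Spec_distinctSubstring, distinctSubstring, distinctSubstring_alt]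
  by_cases hN : N ≤ 0
  · rw [PySem.List.pyRange_one_eq_nil (by omega)]
    have hmax : max N 0 = 0 := by omega
    rw [hmax, PySem.List.pyRange_one_eq_nil (by omega)]
    rfl
  · have hmax : max N 0 = N := by omega
    rw [hmax, PySem.List.slice_to P.toList (by omega : (0:Int) ≤ N)]
    congr 1
    apply PySem.List.foldl_congr_mem
    intro acc i hi
    rw [PySem.List.mem_pyRange_one] at hi
    have h0 : (0 : Int) = PySem.List.pyGetD (pvWB_pre Q.toList (P.toList.take N.toNat)) i 0
        - PySem.List.pyGetD (pvWB_pre Q.toList (P.toList.take N.toNat)) i 0 := by ring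
    have hsl : ([] : List Char) = PySem.List.slice P.toList (some i) (some i) := by
      rw [PySem.List.slice_toNat P.toList (by omega) (by omega)]
      simp
    rw [h0, hsl]
    exact pvInner_eq P.toList Q.toList K N hlen i (by omega) i (le_refl i) (by omega) acc
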